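-- pv_equiv track=rewrite | github.com/dimas0311/home-price-predictor | script/jamesedition.py | clean_locality
-- ===== SOURCE A (Python) =====
-- def clean_locality(locality):
--     """Remove prefixes like 'House in' from locality"""
--     prefixes_to_remove = [
--         'House in ',
--         'Villa in ',
--         'Apartment in ',
--         'Condo in ',
--         'Estate in ',
--         'Property in ',
--         'Country House in ',
--         'Penthouse in '
--     ]
--
--     cleaned_locality = locality
--     for prefix in prefixes_to_remove:
--         if cleaned_locality.startswith(prefix):
--             cleaned_locality = cleaned_locality[len(prefix):]
--             break
--
--     return cleaned_locality
-- ===== SOURCE B (Python) =====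
-- PREFIX_TYPES = {'House', 'Villa', 'Apartment', 'Condo', 'Estate',
--                 'Property', 'Country House', 'Penthouse'}
--
--
-- def clean_locality(locality):
--     """Remove prefixes like 'House in' from locality"""
--     i = locality.find(' in ')
--     if i >= 0 and locality[:i] in PREFIX_TYPES:
--         return locality[i + 4:]
--     return locality
-- ===== Notes on version B (the rewrite author's own statement) =====
-- stated objective: idiomatic
-- what changed: Replaced the 8-way startswith loop by a single search for the first separator occurrence plus one set-membership test of the part before it.
import Mathlib
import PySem

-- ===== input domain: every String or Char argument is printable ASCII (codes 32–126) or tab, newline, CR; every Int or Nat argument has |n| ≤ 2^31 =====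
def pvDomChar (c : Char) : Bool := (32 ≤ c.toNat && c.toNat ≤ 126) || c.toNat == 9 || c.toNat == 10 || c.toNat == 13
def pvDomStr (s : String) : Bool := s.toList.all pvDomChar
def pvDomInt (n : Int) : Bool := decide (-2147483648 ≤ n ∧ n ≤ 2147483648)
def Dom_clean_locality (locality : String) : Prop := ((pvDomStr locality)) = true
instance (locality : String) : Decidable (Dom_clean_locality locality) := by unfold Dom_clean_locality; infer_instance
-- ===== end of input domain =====

-- B replaces A's 8-way startswith loop by one find(' in ') plus a set lookup of the part before it (idiomatic; same cost).

-- ===== PORT A =====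
def pvPrefixesA : List String :=
  ["House in ", "Villa in ", "Apartment in ", "Condo in ",
   "Estate in ", "Property in ", "Country House in ", "Penthouse in "]

-- A's for-loop with break: strip the first matching prefix, then stop
def pvStripLoop : List String → String → String
  | [], cleaned => cleaned
  | p :: ps, cleaned =>
      if PySem.Str.startswith cleaned p then
        PySem.Str.slice cleaned (some (PySem.Str.len p)) none
      else pvStripLoop ps cleaned

def clean_locality (locality : String) : String :=
  pvStripLoop pvPrefixesA locality

-- ===== PORT B =====
def pvPrefixTypes : PySem.Set String :=
  PySem.Set.ofList ["House", "Villa", "Apartment", "Condo", "Estate",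
                    "Property", "Country House", "Penthouse"]

def clean_locality_alt (locality : String) : String :=
  let i := PySem.Str.find locality " in "
  if 0 ≤ i ∧ PySem.Set.contains pvPrefixTypes (PySem.Str.slice locality none (some i)) then
    PySem.Str.slice locality (some (i + 4)) none
  else locality

-- ===== PRECONDITION & SPEC =====
def Spec_clean_locality (locality : String) (out : String) : Prop := out = clean_locality_alt locality
instance (locality : String) (out : String) : Decidable (Spec_clean_locality locality out) := by unfold Spec_clean_locality; infer_instance

-- ===== CLAIM (what is proved, stated in full; the proofs are below) =====
def Claim_equal_clean_locality : Prop := ∀ (locality : String), Dom_clean_locality locality → Spec_clean_locality locality (clean_locality locality)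

-- ===== LEMMAS AND PROOFS =====

-- the first occurrence of " in " in q ++ " in " ++ r sits at index q.length,
-- provided there is no earlier occurrence inside q ++ " in "
theorem pv_find_concat (q r : List Char)
    (hno : ∀ i < q.length, ¬ (" in ".toList <+: ((q ++ " in ".toList).drop i))) :
    PySem.Chars.find (q ++ " in ".toList ++ r) " in ".toList = (q.length : Int) := by
  have hin : " in ".toList <:+: (q ++ " in ".toList ++ r) := ⟨q, r, by simp⟩
  have h0 : 0 ≤ PySem.Chars.find (q ++ " in ".toList ++ r) " in ".toList :=
    (PySem.Chars.find_nonneg_iff _ _).mpr hin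
  obtain ⟨h1, h2⟩ := PySem.Chars.find_spec h0
  set f := (PySem.Chars.find (q ++ " in ".toList ++ r) " in ".toList).toNat with hf
  have hle : f ≤ q.length := by
    by_contra hgt
    push Not at hgt
    refine h2 q.length hgt ?_
    rw [List.append_assoc, List.drop_left]
    exact ⟨r, rfl⟩
  have hge : q.length ≤ f := by
    by_contra hlt
    push Not at hlt
    apply hno f hlt
    have hfl : f ≤ (q ++ " in ".toList).length := by simp; omega
    have hd : (q ++ " in ".toList ++ r).drop f = (q ++ " in ".toList).drop f ++ r :=
      List.drop_append_of_le_length hfl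
    rw [hd] at h1
    have hlen : " in ".toList.length ≤ ((q ++ " in ".toList).drop f).length := by simp; omega
    have := List.prefix_iff_eq_take.mp h1
    rw [List.take_append_of_le_length hlen] at this
    exact List.prefix_iff_eq_take.mpr this
  omega

-- when locality = q ++ " in " ++ r with q a prefix type, B strips exactly q ++ " in "
theorem pv_alt_strip (locality : String) (q r : List Char)
    (hr : locality.toList = q ++ " in ".toList ++ r)
    (hno : ∀ i < q.length, ¬ (" in ".toList <+: ((q ++ " in ".toList).drop i)))
    (hmem : PySem.Set.contains pvPrefixTypes (String.ofList q) = true) :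
    (clean_locality_alt locality).toList = r := by
  have hfind : PySem.Str.find locality " in " = (q.length : Int) := by
    rw [PySem.Str.find_eq, hr]
    exact pv_find_concat q r hno
  have hslice : PySem.Str.slice locality none (some ((q.length : Int))) = String.ofList q := by
    apply String.toList_inj.mp
    simp [hr, PySem.List.slice_to_natCast, List.take_left']
  have hcast : (q.length : Int) + 4 = ((q.length + 4 : Nat) : Int) := by push_cast; ring
  unfold clean_locality_alt
  rw [hfind, if_pos]
  · rw [PySem.Str.toList_slice, hcast]
    simp only [PySem.Chars.slice_eq_listSlice, PySem.List.slice_from_natCast]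
    rw [hr]
    exact List.drop_left' (by simp)
  · exact ⟨by positivity, by rw [hslice]; exact hmem⟩

-- positive case: if locality startswith pfull = t ++ " in ", A's strip equals B
theorem pv_case_yes (locality t pfull : String)
    (hteq : t.toList ++ " in ".toList = pfull.toList)
    (hstart : PySem.Str.startswith locality pfull = true)
    (hno : ∀ i < t.toList.length, ¬ (" in ".toList <+: ((t.toList ++ " in ".toList).drop i)))
    (hmem : PySem.Set.contains pvPrefixTypes t = true) :
    PySem.Str.slice locality (some (PySem.Str.len pfull)) none = clean_locality_alt locality := by
  obtain ⟨r, hr⟩ := (PySem.Chars.startswith_iff _ _).mp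
    (by rw [← PySem.Str.startswith_eq]; exact hstart)
  have hrl : locality.toList = t.toList ++ " in ".toList ++ r := by rw [← hr, ← hteq]
  have hmem' : PySem.Set.contains pvPrefixTypes (String.ofList t.toList) = true := by
    rw [String.ofList_toList]; exact hmem
  apply String.toList_inj.mp
  rw [pv_alt_strip locality t.toList r hrl hno hmem']
  rw [PySem.Str.toList_slice, PySem.Chars.slice_eq_listSlice, PySem.Str.len_eq,
      PySem.List.slice_from _ (by positivity)]
  rw [Int.toNat_natCast, ← hr, List.drop_left]

-- negative case: if no prefix matches, B returns locality unchanged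
theorem pv_case_no (locality t pfull : String) (rest : List Char)
    (hteq : t.toList ++ " in ".toList = pfull.toList)
    (hstart : PySem.Str.startswith locality pfull = false)
    (hdecomp : locality.toList = t.toList ++ " in ".toList ++ rest) : False := by
  have htrue : PySem.Str.startswith locality pfull = true := by
    rw [PySem.Str.startswith_eq]
    exact (PySem.Chars.startswith_iff _ _).mpr ⟨rest, by rw [hdecomp, ← hteq]⟩
  rw [hstart] at htrue
  exact Bool.false_ne_true htrue

theorem pv_alt_id (locality : String)
    (hns : ∀ p ∈ pvPrefixesA, PySem.Str.startswith locality p = false) :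
    clean_locality_alt locality = locality := by
  rw [show clean_locality_alt locality = (if 0 ≤ PySem.Str.find locality " in " ∧ PySem.Set.contains pvPrefixTypes (PySem.Str.slice locality none (some (PySem.Str.find locality " in "))) then PySem.Str.slice locality (some (PySem.Str.find locality " in " + 4)) none else locality) from rfl]
  rw [if_neg]
  rintro ⟨h0, hc⟩
  have h0' : 0 ≤ PySem.Chars.find locality.toList " in ".toList := by
    rw [PySem.Str.find_eq] at h0; exact h0
  obtain ⟨hpre, -⟩ := PySem.Chars.find_spec h0'
  obtain ⟨rest, hrest⟩ := hpre
  have htake : (PySem.Str.slice locality none (some (PySem.Str.find locality " in "))).toList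
      = locality.toList.take (PySem.Chars.find locality.toList " in ".toList).toNat := by
    rw [PySem.Str.toList_slice, PySem.Chars.slice_eq_listSlice, PySem.Str.find_eq,
        PySem.List.slice_to _ h0']
  have hdecomp : locality.toList
      = (PySem.Str.slice locality none (some (PySem.Str.find locality " in "))).toList
          ++ " in ".toList ++ rest := by
    rw [htake, List.append_assoc, hrest, List.take_append_drop]
  have hmem : PySem.Str.slice locality none (some (PySem.Str.find locality " in ")) = "House"
      ∨ PySem.Str.slice locality none (some (PySem.Str.find locality " in ")) = "Villa"
      ∨ PySem.Str.slice locality none (some (PySem.Str.find locality " in ")) = "Apartment"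
      ∨ PySem.Str.slice locality none (some (PySem.Str.find locality " in ")) = "Condo"
      ∨ PySem.Str.slice locality none (some (PySem.Str.find locality " in ")) = "Estate"
      ∨ PySem.Str.slice locality none (some (PySem.Str.find locality " in ")) = "Property"
      ∨ PySem.Str.slice locality none (some (PySem.Str.find locality " in ")) = "Country House"
      ∨ PySem.Str.slice locality none (some (PySem.Str.find locality " in ")) = "Penthouse" := by
    simpa [pvPrefixTypes, PySem.Set.ofList, PySem.Set.contains] using hc
  rcases hmem with h | h | h | h | h | h | h | h
  · exact pv_case_no locality "House" "House in " rest (by decide) (hns _ (by simp [pvPrefixesA])) (by rw [← h]; exact hdecomp)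
  · exact pv_case_no locality "Villa" "Villa in " rest (by decide) (hns _ (by simp [pvPrefixesA])) (by rw [← h]; exact hdecomp)
  · exact pv_case_no locality "Apartment" "Apartment in " rest (by decide) (hns _ (by simp [pvPrefixesA])) (by rw [← h]; exact hdecomp)
  · exact pv_case_no locality "Condo" "Condo in " rest (by decide) (hns _ (by simp [pvPrefixesA])) (by rw [← h]; exact hdecomp)
  · exact pv_case_no locality "Estate" "Estate in " rest (by decide) (hns _ (by simp [pvPrefixesA])) (by rw [← h]; exact hdecomp)
  · exact pv_case_no locality "Property" "Property in " rest (by decide) (hns _ (by simp [pvPrefixesA])) (by rw [← h]; exact hdecomp)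
  · exact pv_case_no locality "Country House" "Country House in " rest (by decide) (hns _ (by simp [pvPrefixesA])) (by rw [← h]; exact hdecomp)
  · exact pv_case_no locality "Penthouse" "Penthouse in " rest (by decide) (hns _ (by simp [pvPrefixesA])) (by rw [← h]; exact hdecomp)

-- ===== VERDICT (by name: the statement is the Claim_ definition above) =====
theorem clean_locality_spec : Claim_equal_clean_locality := by
  intro locality _
  unfold Spec_clean_locality clean_locality
  by_cases h1 : PySem.Str.startswith locality "House in " = true
  · simp only [pvPrefixesA, pvStripLoop, h1, if_true]
    exact pv_case_yes locality "House" "House in " (by decide) h1 (by decide) (by decide)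
  rw [Bool.not_eq_true] at h1
  by_cases h2 : PySem.Str.startswith locality "Villa in " = true
  · simp only [pvPrefixesA, pvStripLoop, h1, h2, Bool.false_eq_true, if_false, if_true]
    exact pv_case_yes locality "Villa" "Villa in " (by decide) h2 (by decide) (by decide)
  rw [Bool.not_eq_true] at h2
  by_cases h3 : PySem.Str.startswith locality "Apartment in " = true
  · simp only [pvPrefixesA, pvStripLoop, h1, h2, h3, Bool.false_eq_true, if_false, if_true]
    exact pv_case_yes locality "Apartment" "Apartment in " (by decide) h3 (by decide) (by decide)
  rw [Bool.not_eq_true] at h3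
  by_cases h4 : PySem.Str.startswith locality "Condo in " = true
  · simp only [pvPrefixesA, pvStripLoop, h1, h2, h3, h4, Bool.false_eq_true, if_false, if_true]
    exact pv_case_yes locality "Condo" "Condo in " (by decide) h4 (by decide) (by decide)
  rw [Bool.not_eq_true] at h4
  by_cases h5 : PySem.Str.startswith locality "Estate in " = true
  · simp only [pvPrefixesA, pvStripLoop, h1, h2, h3, h4, h5, Bool.false_eq_true, if_false, if_true]
    exact pv_case_yes locality "Estate" "Estate in " (by decide) h5 (by decide) (by decide)
  rw [Bool.not_eq_true] at h5
  by_cases h6 : PySem.Str.startswith locality "Property in " = true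
  · simp only [pvPrefixesA, pvStripLoop, h1, h2, h3, h4, h5, h6, Bool.false_eq_true, if_false, if_true]
    exact pv_case_yes locality "Property" "Property in " (by decide) h6 (by decide) (by decide)
  rw [Bool.not_eq_true] at h6
  by_cases h7 : PySem.Str.startswith locality "Country House in " = true
  · simp only [pvPrefixesA, pvStripLoop, h1, h2, h3, h4, h5, h6, h7, Bool.false_eq_true, if_false, if_true]
    exact pv_case_yes locality "Country House" "Country House in " (by decide) h7 (by decide) (by decide)
  rw [Bool.not_eq_true] at h7
  by_cases h8 : PySem.Str.startswith locality "Penthouse in " = true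
  · simp only [pvPrefixesA, pvStripLoop, h1, h2, h3, h4, h5, h6, h7, h8, Bool.false_eq_true, if_false, if_true]
    exact pv_case_yes locality "Penthouse" "Penthouse in " (by decide) h8 (by decide) (by decide)
  rw [Bool.not_eq_true] at h8
  simp only [pvPrefixesA, pvStripLoop, h1, h2, h3, h4, h5, h6, h7, h8, Bool.false_eq_true, if_false]
  refine (pv_alt_id locality ?_).symm
  intro p hp
  simp only [pvPrefixesA, List.mem_cons, List.not_mem_nil, or_false] at hp
  rcases hp with rfl | rfl | rfl | rfl | rfl | rfl | rfl | rfl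
  exact h1
  exact h2
  exact h3
  exact h4
  exact h5
  exact h6
  exact h7
  exact h8
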